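-- pv_equiv track=rewrite | github.com/llewpriimak/class_work | CS313E/Homework Assignments/Cipher.py | e_string_table
-- ===== SOURCE A (Python) =====
-- def e_string_table(complete_message, size):
--     table = [[None] * size for i in range(size)]
--     k = 0
--     for i in range(size):
--         for j in range(size):
--             if k < len(complete_message):
--                 table[i][j] = complete_message[k]
--                 k += 1
--             else:
--                 break
--     return table
-- ===== SOURCE B (Python) =====
-- def e_string_table(complete_message, size):
--     # Pad-then-chunk: build the flat payload once, then slice it into rows.
--     if size <= 0:
--         return []
--     payload = list(complete_message) + [None] * (size * size - len(complete_message))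
--     return [payload[i * size:(i + 1) * size] for i in range(size)]
-- ===== Notes on version B (the rewrite author's own statement) =====
-- stated objective: simpler
-- what changed: Replaces the cell-by-cell nested loop with a running counter and break by padding the character list to size*size once and slicing it into consecutive size-length rows.
import Mathlib
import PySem

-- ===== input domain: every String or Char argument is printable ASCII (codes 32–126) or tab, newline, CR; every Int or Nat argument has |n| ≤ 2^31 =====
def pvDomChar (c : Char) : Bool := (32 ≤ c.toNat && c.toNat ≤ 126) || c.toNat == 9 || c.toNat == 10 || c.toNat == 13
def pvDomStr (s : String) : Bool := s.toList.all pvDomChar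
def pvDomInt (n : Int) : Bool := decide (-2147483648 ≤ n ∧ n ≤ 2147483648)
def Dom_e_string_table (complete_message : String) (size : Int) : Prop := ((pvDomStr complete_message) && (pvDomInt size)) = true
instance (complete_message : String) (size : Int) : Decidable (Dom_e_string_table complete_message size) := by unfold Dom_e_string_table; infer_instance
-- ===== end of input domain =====

-- B pads the flat character list to size*size and slices it into size-length rows,
-- replacing A's nested cell-by-cell fill with a running counter and break (objective: simpler).

-- ===== PORT A =====
-- Inner loop over j in range(size): write chars while k < len, break leaves the rest None.
def pvRowA (msg : List String) (k : Nat) : Nat → List (Option String) × Nat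
  | 0 => ([], k)
  | s + 1 =>
    if h : k < msg.length then
      let r := pvRowA msg (k + 1) s
      (some msg[k] :: r.1, r.2)
    else
      (List.replicate (s + 1) (none : Option String), k)

-- Outer loop over i in range(size), threading the counter k through the rows.
def pvRowsA (msg : List String) (k : Nat) : Nat → Nat → List (List (Option String))
  | 0, _ => []
  | m + 1, sz =>
    let r := pvRowA msg k sz
    r.1 :: pvRowsA msg r.2 m sz

def e_string_table (complete_message : String) (size : Int) : List (List (Option String)) :=
  let msg := complete_message.toList.map (fun c => String.ofList [c])
  pvRowsA msg 0 size.toNat size.toNat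

-- ===== PORT B =====
def e_string_table_alt (complete_message : String) (size : Int) : List (List (Option String)) :=
  if size ≤ 0 then [] else
  let payload :=
    (complete_message.toList.map (fun c => (some (String.ofList [c]) : Option String))) ++
      List.replicate (size * size - (complete_message.toList.length : Int)).toNat
        (none : Option String)
  (PySem.List.pyRange 0 size 1).map
    (fun i => PySem.List.slice payload (some (i * size)) (some ((i + 1) * size)))

-- ===== PRECONDITION & SPEC =====
def Spec_e_string_table (complete_message : String) (size : Int) (out : List (List (Option String))) : Prop := out = e_string_table_alt complete_message size
instance (complete_message : String) (size : Int) (out : List (List (Option String))) : Decidable (Spec_e_string_table complete_message size out) := by unfold Spec_e_string_table; infer_instance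

-- ===== CLAIM (what is proved, stated in full; the proofs are below) =====
def Claim_equal_e_string_table : Prop := ∀ (complete_message : String) (size : Int), Dom_e_string_table complete_message size → Spec_e_string_table complete_message size (e_string_table complete_message size)

-- ===== LEMMAS AND PROOFS =====

-- A's inner loop, characterised: the row is a chunk of the mapped message followed by Nones,
-- and the counter advances to min (k+s) L.
theorem pvRowA_eq (msg : List String) (s : Nat) : ∀ k : Nat, k ≤ msg.length →
    pvRowA msg k s =
      (((msg.map some).drop k).take s ++ List.replicate (s - (msg.length - k)) (none : Option String),
        min (k + s) msg.length) := by
  induction s with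
  | zero =>
    intro k hk
    simp [pvRowA]
    omega
  | succ s ih =>
    intro k hk
    by_cases h : k < msg.length
    · have hk1 : k + 1 ≤ msg.length := h
      have hkm : k < (msg.map some).length := by simpa using h
      rw [pvRowA]
      simp only [dif_pos h, ih (k + 1) hk1, Prod.mk.injEq]
      constructor
      · rw [List.drop_eq_getElem_cons hkm, List.take_succ_cons]
        have : s + 1 - (msg.length - k) = s - (msg.length - (k + 1)) := by omega
        simp [this]
      · omega
    · have hkL : k = msg.length := by omega
      rw [pvRowA]
      simp only [dif_neg h]
      subst hkL
      simp

-- One chunk: A's row at counter min a L equals B's slice of the padded payload at offset a.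
theorem chunk_eq (msg : List String) (n a : Nat) (ha : a + n ≤ n * n) :
    ((msg.map some).drop (min a msg.length)).take n ++
        List.replicate (n - (msg.length - min a msg.length)) (none : Option String) =
      ((msg.map some ++ List.replicate (n * n - msg.length) (none : Option String)).drop a).take n := by
  set L := msg.length with hL
  have hPlen : (msg.map some).length = L := by simp [hL]
  by_cases hcase : a ≤ L
  · have hmin : min a L = a := by omega
    rw [hmin]
    rw [List.drop_append_of_le_length (by omega)]
    rw [List.take_append]
    have hlen : ((msg.map some).drop a).length = L - a := by simp [hPlen]
    rw [hlen, List.take_replicate]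
    have : min n (L - a) + (n * n - L) ≥ n := by omega
    have hminr : min (n - (L - a)) (n * n - L) = n - (L - a) := by omega
    rw [hminr]
  · have hmin : min a L = L := by omega
    rw [hmin]
    rw [List.drop_eq_nil_of_le (by omega), List.take_nil, List.nil_append]
    rw [List.drop_append, List.drop_eq_nil_of_le (by omega), List.nil_append,
      List.drop_replicate, List.take_replicate, hPlen]
    have : min n (n * n - L - (a - L)) = n := by omega
    rw [this]
    congr 1
    omega

-- A's outer loop from row i onward equals B's chunks at offsets i*n, (i+1)*n, ….
theorem pvRowsA_eq (msg : List String) (n : Nat) : ∀ (m i : Nat), i + m = n →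
    pvRowsA msg (min (i * n) msg.length) m n =
      (List.range' i m).map
        (fun j => ((msg.map some ++
            List.replicate (n * n - msg.length) (none : Option String)).drop (j * n)).take n) := by
  intro m
  induction m with
  | zero => intro i _; simp [pvRowsA]
  | succ m' ih =>
    intro i hi
    have hin : i < n := by omega
    have han : i * n + n ≤ n * n := by
      calc i * n + n = (i + 1) * n := by ring
        _ ≤ n * n := Nat.mul_le_mul_right _ (by omega)
    rw [pvRowsA]
    rw [pvRowA_eq msg n (min (i * n) msg.length) (by omega)]
    simp only
    have hk' : min (min (i * n) msg.length + n) msg.length = min ((i + 1) * n) msg.length := by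
      have : (i + 1) * n = i * n + n := by ring
      omega
    rw [hk', ih (i + 1) (by omega)]
    rw [List.range'_succ, List.map_cons]
    congr 1
    exact chunk_eq msg n (i * n) han

-- B's comprehension, reduced to the same chunks (for a positive size n).
theorem altB_eq (complete_message : String) (n : Nat) (hn : 0 < n) :
    e_string_table_alt complete_message (n : Int) =
      (List.range' 0 n).map
        (fun j => (((complete_message.toList.map (fun c => String.ofList [c])).map some ++
            List.replicate (n * n - complete_message.toList.length)
              (none : Option String)).drop (j * n)).take n) := by
  unfold e_string_table_alt
  rw [if_neg (by omega)]
  have hpad : (((n : Int) * n - (complete_message.toList.length : Int)).toNat)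
      = n * n - complete_message.toList.length := by
    omega
  rw [PySem.List.pyRange_one, List.map_map]
  have hrange : ((n : Int) - 0).toNat = n := by omega
  rw [hrange, ← List.range_eq_range' ]
  apply List.map_congr_left
  intro k _
  simp only [Function.comp]
  have h1 : (0 + (k : Int)) * n = ((k * n : Nat) : Int) := by push_cast; ring
  have h2 : (0 + (k : Int) + 1) * n = ((k * n : Nat) : Int) + ((n : Nat) : Int) := by push_cast; ring
  rw [h1, h2, PySem.List.slice_natCast_add, hpad, List.map_map]
  rfl

-- ===== VERDICT (by name: the statement is the Claim_ definition above) =====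
theorem e_string_table_spec : Claim_equal_e_string_table := by
  intro complete_message size _
  unfold Spec_e_string_table
  by_cases hpos : 0 < size
  · have hsz : size = (size.toNat : Int) := by omega
    rw [hsz]
    set n := size.toNat with hn
    have h0 : 0 < n := by omega
    rw [altB_eq complete_message n h0]
    unfold e_string_table
    simp only [Int.toNat_natCast]
    have := pvRowsA_eq (complete_message.toList.map (fun c => String.ofList [c])) n n 0 (by omega)
    simpa using this
  · have h0 : size.toNat = 0 := by omega
    unfold e_string_table e_string_table_alt
    rw [h0, if_pos (by omega)]
    simp [pvRowsA]
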